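-- pv_equiv track=rewrite | github.com/davidmashburn/np_utils | np_utils/array_drawing.py | BresenhamFunction
-- ===== SOURCE A (Python) =====
-- from builtins import zip, map, range
-- from copy import copy
--
-- def BresenhamFunction(p0,p1): # Generalization to n-dimensions
--     ndim = len(p0)
--     delta = [ p1[i]-p0[i] for i in range(ndim) ]
--     signs = [ (-1 if d<0 else 1) for d in delta ]
--     delta = [ abs(d) for d in delta ]
--     imax = delta.index(max(delta)) # The dimension that we go the farthest in
--     err = [ delta[imax]//2 ] * ndim
--
--     p = list(p0) # make a shallow copy, and ensure it's a list
--     l=[]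
--     for pmax in range(delta[imax]+1): # in the longest dimension, step evenly
--         l.append(copy(p))
--         for i in range(ndim):
--             err[i] -= delta[i]
--             if i==imax or err[i]<0:
--                 p[i] += signs[i]
--                 err[i] += delta[imax]
--     return l
-- ===== SOURCE B (Python) =====
-- def BresenhamFunction(p0, p1):
--     ndim = len(p0)
--     delta = [p1[i] - p0[i] for i in range(ndim)]
--     signs = [(-1 if d < 0 else 1) for d in delta]
--     delta = [abs(d) for d in delta]
--     dmax = max(delta)
--     if dmax == 0:
--         return [list(p0)]
--     half = dmax // 2
--     return [[p0[i] + signs[i] * (-((half - delta[i] * t) // dmax)) for i in range(ndim)]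
--             for t in range(dmax + 1)]
-- ===== Notes on version B (the rewrite author's own statement) =====
-- stated objective: alternative
-- what changed: B replaces the incremental error-accumulator loop (mutable err/p lists updated per step) by a direct closed-form construction: point t's coordinate i is p0[i] + signs[i]*ceil((delta[i]*t - dmax//2)/dmax), computed independently per (t,i).
import Mathlib
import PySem

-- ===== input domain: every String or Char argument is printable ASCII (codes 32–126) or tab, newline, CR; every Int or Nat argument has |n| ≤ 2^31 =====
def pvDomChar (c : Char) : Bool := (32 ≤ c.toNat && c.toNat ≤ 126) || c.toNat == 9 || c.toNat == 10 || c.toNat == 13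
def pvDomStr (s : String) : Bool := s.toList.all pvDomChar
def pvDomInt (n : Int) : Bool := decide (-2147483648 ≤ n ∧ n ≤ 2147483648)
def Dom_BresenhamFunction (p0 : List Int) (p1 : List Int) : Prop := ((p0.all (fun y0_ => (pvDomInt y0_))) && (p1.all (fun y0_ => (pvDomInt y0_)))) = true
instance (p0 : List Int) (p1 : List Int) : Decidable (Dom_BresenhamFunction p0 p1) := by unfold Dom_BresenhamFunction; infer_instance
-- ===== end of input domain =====

-- B builds each Bresenham point by a closed-form per-coordinate formula instead of A's incremental error accumulators (alternative decomposition, same cost).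


-- ===== PORT A =====
-- inner 'for i in range(ndim)' loop body: update err[i], maybe step p[i]
def bresInner (imax : Nat) (dmax : Int) (delta signs : List Int)
    (st : List Int × List Int) (i : Int) : List Int × List Int :=
  let err := PySem.List.pySetD st.1 i (PySem.List.pyGetD st.1 i 0 - PySem.List.pyGetD delta i 0)
  if i = (imax : Int) ∨ PySem.List.pyGetD err i 0 < 0 then
    (PySem.List.pySetD err i (PySem.List.pyGetD err i 0 + dmax),
     PySem.List.pySetD st.2 i (PySem.List.pyGetD st.2 i 0 + PySem.List.pyGetD signs i 0))
  else (err, st.2)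

-- outer loop body: append copy(p), then run the inner loop
def bresOuter (imax : Nat) (dmax : Int) (delta signs : List Int) (ndim : Nat)
    (st : (List Int × List Int) × List (List Int)) (_pmax : Int) :
    (List Int × List Int) × List (List Int) :=
  ((PySem.List.pyRange 0 (ndim : Int) 1).foldl (bresInner imax dmax delta signs) st.1,
   st.2 ++ [st.1.2])

def BresenhamFunction (p0 : List Int) (p1 : List Int) : List (List Int) :=
  let ndim := p0.length
  let delta := (PySem.List.pyRange 0 (ndim : Int) 1).map
      (fun i => PySem.List.pyGetD p1 i 0 - PySem.List.pyGetD p0 i 0)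
  let signs := delta.map (fun d => if d < 0 then (-1 : Int) else 1)
  let delta := delta.map (fun d => |d|)
  let imax := (PySem.List.index? delta ((PySem.List.max? delta (fun x => x)).getD 0)).getD 0
  let dmax := PySem.List.pyGetD delta (imax : Int) 0
  let err := List.replicate ndim (PySem.Int.floordiv dmax 2)
  ((PySem.List.pyRange 0 (dmax + 1) 1).foldl (bresOuter imax dmax delta signs ndim) ((err, p0), [])).2

-- ===== PORT B =====
def BresenhamFunction_alt (p0 : List Int) (p1 : List Int) : List (List Int) :=
  let ndim := p0.length
  let delta := (PySem.List.pyRange 0 (ndim : Int) 1).map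
      (fun i => PySem.List.pyGetD p1 i 0 - PySem.List.pyGetD p0 i 0)
  let signs := delta.map (fun d => if d < 0 then (-1 : Int) else 1)
  let delta := delta.map (fun d => |d|)
  let dmax := (PySem.List.max? delta (fun x => x)).getD 0
  if dmax = 0 then [p0]
  else
    let half := PySem.Int.floordiv dmax 2
    (PySem.List.pyRange 0 (dmax + 1) 1).map (fun t =>
      (PySem.List.pyRange 0 (ndim : Int) 1).map (fun i =>
        PySem.List.pyGetD p0 i 0 + PySem.List.pyGetD signs i 0 *
          (-(PySem.Int.floordiv (half - PySem.List.pyGetD delta i 0 * t) dmax))))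

-- ===== PRECONDITION & SPEC =====
-- Pre_ excludes exactly the inputs where A raises: empty p0 (ValueError from max([]))
-- and p1 shorter than p0 (IndexError); B raises the same exceptions there.
def Pre_BresenhamFunction (p0 : List Int) (p1 : List Int) : Prop :=
  p0 ≠ [] ∧ p0.length ≤ p1.length
instance (p0 : List Int) (p1 : List Int) : Decidable (Pre_BresenhamFunction p0 p1) := by
  unfold Pre_BresenhamFunction; infer_instance

def pvWitness_BresenhamFunction : List Int × List Int := ([0, 0], [3, 1])

def Spec_BresenhamFunction (p0 : List Int) (p1 : List Int) (out : List (List Int)) : Prop := out = BresenhamFunction_alt p0 p1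
instance (p0 : List Int) (p1 : List Int) (out : List (List Int)) : Decidable (Spec_BresenhamFunction p0 p1 out) := by unfold Spec_BresenhamFunction; infer_instance

-- ===== CLAIM (what is proved, stated in full; the proofs are below) =====
def Claim_equal_BresenhamFunction : Prop := ∀ (p0 : List Int) (p1 : List Int), Dom_BresenhamFunction p0 p1 → Pre_BresenhamFunction p0 p1 → Spec_BresenhamFunction p0 p1 (BresenhamFunction p0 p1)

-- ===== LEMMAS AND PROOFS =====

-- proof-side view: a length-n list as a function on range indices
def pvL (n : Nat) (f : Int → Int) : List Int := (PySem.List.pyRange 0 (n : Int) 1).map f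

-- per-coordinate effect of one inner-loop pass on err (resp. p)
def pvInnE (imax : Nat) (dmax : Int) (da : List Int) (e : Int → Int) (j : Int) : Int :=
  if j = (imax : Int) ∨ e j - PySem.List.pyGetD da j 0 < 0 then
    e j - PySem.List.pyGetD da j 0 + dmax
  else e j - PySem.List.pyGetD da j 0

def pvInnQ (imax : Nat) (da sg : List Int) (e q : Int → Int) (j : Int) : Int :=
  if j = (imax : Int) ∨ e j - PySem.List.pyGetD da j 0 < 0 then
    q j + PySem.List.pyGetD sg j 0
  else q j

-- closed forms for err and p after t outer iterations
def pvEE (da : List Int) (h m j t : Int) : Int := (h - PySem.List.pyGetD da j 0 * t) % m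

def pvPP (p0 sg da : List Int) (h m j t : Int) : Int :=
  PySem.List.pyGetD p0 j 0 + PySem.List.pyGetD sg j 0 * (-((h - PySem.List.pyGetD da j 0 * t) / m))

lemma pvL_congr {n : Nat} {f g : Int → Int}
    (h : ∀ j : Int, 0 ≤ j → j < (n : Int) → f j = g j) : pvL n f = pvL n g := by
  apply List.map_congr_left
  intro a ha
  rcases PySem.List.mem_pyRange_one.1 ha with ⟨h0, h1⟩
  exact h a h0 h1

lemma pvL_get {n : Nat} (f : Int → Int) {i : Int} (h0 : 0 ≤ i) (h1 : i < (n : Int)) :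
    PySem.List.pyGetD (pvL n f) i 0 = f i :=
  PySem.List.pyGetD_map_pyRange_of_nonneg f (n : Int) i 0 h0 h1

lemma pvL_set {n : Nat} (f : Int → Int) {i : Int} (v : Int) (h0 : 0 ≤ i) (_h1 : i < (n : Int)) :
    PySem.List.pySetD (pvL n f) i v = pvL n (fun j => if j = i then v else f j) := by
  rw [PySem.List.pySetD_of_nonneg _ v h0]
  apply List.ext_getElem
  · simp [pvL]
  · intro k hk hk'
    rw [List.getElem_set]
    simp only [pvL, List.getElem_map, PySem.List.getElem_pyRange_one, zero_add]
    by_cases hik : i.toNat = k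
    · rw [if_pos hik, if_pos (by omega : ((k : Nat) : Int) = i)]
    · rw [if_neg hik, if_neg (by omega : ¬ ((k : Nat) : Int) = i)]

-- one inner-loop body application on function-view state
lemma bresInner_pvL (imax : Nat) (dmax : Int) (da sg : List Int) (n : Nat) (f g : Int → Int)
    {i : Int} (h0 : 0 ≤ i) (h1 : i < (n : Int)) :
    bresInner imax dmax da sg (pvL n f, pvL n g) i =
      (pvL n (fun j => if j = i then pvInnE imax dmax da f i else f j),
       pvL n (fun j => if j = i then pvInnQ imax da sg f g i else g j)) := by
  unfold bresInner
  simp only [pvL_get f h0 h1, pvL_get g h0 h1, pvL_set f _ h0 h1]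
  rw [pvL_get (fun j => if j = i then f i - PySem.List.pyGetD da i 0 else f j) h0 h1]
  have hii : (if i = i then f i - PySem.List.pyGetD da i 0 else f i)
      = f i - PySem.List.pyGetD da i 0 := if_pos rfl
  rw [hii]
  unfold pvInnE pvInnQ
  by_cases hc : i = (imax : Int) ∨ f i - PySem.List.pyGetD da i 0 < 0
  · simp only [if_pos hc]
    rw [pvL_set (fun j => if j = i then f i - PySem.List.pyGetD da i 0 else f j) _ h0 h1,
      pvL_set g _ h0 h1]
    refine congrArg₂ Prod.mk (pvL_congr ?_) (pvL_congr ?_) <;>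
      · intro j hj0 hj1
        by_cases hji : j = i <;> simp [hji]
  · simp only [if_neg hc]
    refine congrArg₂ Prod.mk (pvL_congr ?_) (pvL_congr ?_) <;>
      · intro j hj0 hj1
        by_cases hji : j = i <;> simp [hji]

lemma inner_fold (imax : Nat) (dmax : Int) (da sg : List Int) (n : Nat) (e q : Int → Int) :
    ∀ k : Nat, k ≤ n →
    (PySem.List.pyRange 0 (k : Int) 1).foldl (bresInner imax dmax da sg) (pvL n e, pvL n q)
    = (pvL n (fun j => if j < (k : Int) then pvInnE imax dmax da e j else e j),
       pvL n (fun j => if j < (k : Int) then pvInnQ imax da sg e q j else q j)) := by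
  intro k
  induction k with
  | zero =>
    intro _
    rw [Nat.cast_zero, PySem.List.pyRange_one_eq_nil le_rfl]
    refine congrArg₂ Prod.mk ?_ ?_ <;>
      · apply pvL_congr; intro j h0 h1
        rw [if_neg (by omega)]
  | succ k ih =>
    intro hk
    have hkn : k ≤ n := Nat.le_of_succ_le hk
    have hkInt : ((k + 1 : Nat) : Int) = (k : Int) + 1 := by push_cast; ring
    have h0k : (0 : Int) ≤ (k : Int) := by positivity
    have hkn' : (k : Int) < (n : Int) := by exact_mod_cast Nat.lt_of_lt_of_le (Nat.lt_succ_self k) hk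
    rw [hkInt, PySem.List.pyRange_one_succ_right h0k, List.foldl_append, ih hkn]
    simp only [List.foldl_cons, List.foldl_nil]
    rw [bresInner_pvL imax dmax da sg n _ _ h0k hkn']
    have hfk : ∀ x : Int → Int,
        (fun j => if j < (k : Int) then x j else e j) (k : Int) = e (k : Int) := by
      intro x; simp
    refine congrArg₂ Prod.mk ?_ ?_
    · apply pvL_congr; intro j hj0 hj1
      by_cases hji : j = (k : Int)
      · rw [if_pos hji, if_pos (by omega : j < (k : Int) + 1)]
        subst hji
        unfold pvInnE
        simp only [lt_irrefl, if_false]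
      · rw [if_neg hji]
        by_cases hjk : j < (k : Int)
        · rw [if_pos hjk, if_pos (by omega : j < (k : Int) + 1)]
        · rw [if_neg hjk, if_neg (by omega : ¬ j < (k : Int) + 1)]
    · apply pvL_congr; intro j hj0 hj1
      by_cases hji : j = (k : Int)
      · rw [if_pos hji, if_pos (by omega : j < (k : Int) + 1)]
        subst hji
        unfold pvInnQ
        simp only [lt_irrefl, if_false]
      · rw [if_neg hji]
        by_cases hjk : j < (k : Int)
        · rw [if_pos hjk, if_pos (by omega : j < (k : Int) + 1)]
        · rw [if_neg hjk, if_neg (by omega : ¬ j < (k : Int) + 1)]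

-- remainder/quotient step: subtracting d from a shifts (a % m, a / m) as the branch says
lemma pv_divmod (a d m : Int) (hm : 0 < m) (hd0 : 0 ≤ d) (hdm : d ≤ m) :
    ((a - d) % m = if a % m - d < 0 then a % m - d + m else a % m - d) ∧
    ((a - d) / m = if a % m - d < 0 then a / m - 1 else a / m) := by
  have h1 : m * (a / m) + a % m = a := Int.mul_ediv_add_emod a m
  have h2 : 0 ≤ a % m := Int.emod_nonneg a (by omega)
  have h3 : a % m < m := Int.emod_lt_of_pos a hm
  by_cases hc : a % m - d < 0
  · simp only [if_pos hc]
    have := (Int.ediv_emod_unique (a := a - d) (b := m)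
      (r := a % m - d + m) (q := a / m - 1) hm).2
      ⟨by linarith [mul_sub m (a / m) 1], by omega, by omega⟩
    exact ⟨this.2, this.1⟩
  · simp only [if_neg hc]
    have := (Int.ediv_emod_unique (a := a - d) (b := m)
      (r := a % m - d) (q := a / m) hm).2 ⟨by linarith, by omega, by omega⟩
    exact ⟨this.2, this.1⟩

-- one outer iteration advances the closed forms from t to t+1
lemma pv_stepE (da : List Int) (imax : Nat) (h m t j : Int) (hm : 0 < m)
    (hd0 : 0 ≤ PySem.List.pyGetD da j 0) (hdm : PySem.List.pyGetD da j 0 ≤ m)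
    (himax : j = (imax : Int) → PySem.List.pyGetD da j 0 = m) :
    pvInnE imax m da (fun j' => pvEE da h m j' t) j = pvEE da h m j (t + 1) := by
  unfold pvInnE pvEE
  simp only
  set d := PySem.List.pyGetD da j 0 with hd
  set a := h - d * t with ha
  have hshift : h - d * (t + 1) = a - d := by rw [ha]; ring
  rw [hshift]
  have hmod := (pv_divmod a d m hm hd0 hdm).1
  by_cases hP : j = (imax : Int)
  · have hdm2 : d = m := himax hP
    have hrlt : a % m - d < 0 := by
      have := Int.emod_lt_of_pos a hm; omega
    rw [if_pos (Or.inl hP), hmod, if_pos hrlt]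
  · by_cases hr : a % m - d < 0
    · rw [if_pos (Or.inr hr), hmod, if_pos hr]
    · rw [if_neg (by tauto), hmod, if_neg hr]

lemma pv_stepQ (p0 sg da : List Int) (imax : Nat) (h m t j : Int) (hm : 0 < m)
    (hd0 : 0 ≤ PySem.List.pyGetD da j 0) (hdm : PySem.List.pyGetD da j 0 ≤ m)
    (himax : j = (imax : Int) → PySem.List.pyGetD da j 0 = m) :
    pvInnQ imax da sg (fun j' => pvEE da h m j' t) (fun j' => pvPP p0 sg da h m j' t) j
      = pvPP p0 sg da h m j (t + 1) := by
  unfold pvInnQ pvPP pvEE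
  simp only
  set d := PySem.List.pyGetD da j 0 with hd
  set a := h - d * t with ha
  have hshift : h - d * (t + 1) = a - d := by rw [ha]; ring
  rw [hshift]
  have hdiv := (pv_divmod a d m hm hd0 hdm).2
  by_cases hP : j = (imax : Int)
  · have hdm2 : d = m := himax hP
    have hrlt : a % m - d < 0 := by
      have := Int.emod_lt_of_pos a hm; omega
    rw [if_pos (Or.inl hP), hdiv, if_pos hrlt]
    ring
  · by_cases hr : a % m - d < 0
    · rw [if_pos (Or.inr hr), hdiv, if_pos hr]
      ring
    · rw [if_neg (by tauto), hdiv, if_neg hr]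

lemma outer_fold (imax : Nat) (m : Int) (da sg p0 : List Int) (n : Nat) (h : Int)
    (hm : 0 < m)
    (hd : ∀ j : Int, 0 ≤ j → j < (n : Int) → 0 ≤ PySem.List.pyGetD da j 0 ∧ PySem.List.pyGetD da j 0 ≤ m)
    (hdimax : ∀ j : Int, 0 ≤ j → j < (n : Int) → j = (imax : Int) → PySem.List.pyGetD da j 0 = m) :
    ∀ T : Nat,
    (PySem.List.pyRange 0 (T : Int) 1).foldl (bresOuter imax m da sg n)
        ((pvL n (fun j => pvEE da h m j 0), pvL n (fun j => pvPP p0 sg da h m j 0)), [])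
    = ((pvL n (fun j => pvEE da h m j (T : Int)), pvL n (fun j => pvPP p0 sg da h m j (T : Int))),
       (PySem.List.pyRange 0 (T : Int) 1).map (fun t => pvL n (fun j => pvPP p0 sg da h m j t))) := by
  intro T
  induction T with
  | zero => rw [Nat.cast_zero, PySem.List.pyRange_one_eq_nil le_rfl]; rfl
  | succ T ih =>
    have hTInt : ((T + 1 : Nat) : Int) = (T : Int) + 1 := by push_cast; ring
    have h0T : (0 : Int) ≤ (T : Int) := by positivity
    rw [hTInt, PySem.List.pyRange_one_succ_right h0T, List.foldl_append, ih]
    simp only [List.foldl_cons, List.foldl_nil, List.map_append, List.map_cons, List.map_nil]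
    unfold bresOuter
    simp only
    refine congrArg₂ Prod.mk (congrArg₂ Prod.mk ?_ ?_) rfl
    · rw [inner_fold imax m da sg n _ _ n le_rfl]
      apply pvL_congr
      intro j h0 h1
      rw [if_pos h1]
      exact pv_stepE da imax h m (T : Int) j hm (hd j h0 h1).1 (hd j h0 h1).2 (hdimax j h0 h1)
    · rw [inner_fold imax m da sg n _ _ n le_rfl]
      apply pvL_congr
      intro j h0 h1
      rw [if_pos h1]
      exact pv_stepQ p0 sg da imax h m (T : Int) j hm (hd j h0 h1).1 (hd j h0 h1).2 (hdimax j h0 h1)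

-- normal forms of the two ports' shared prefix
def pvF (p0 p1 : List Int) (i : Int) : Int := PySem.List.pyGetD p1 i 0 - PySem.List.pyGetD p0 i 0

def pvDA (p0 p1 : List Int) : List Int := pvL p0.length (fun i => |pvF p0 p1 i|)

def pvSG (p0 p1 : List Int) : List Int :=
  pvL p0.length (fun i => if pvF p0 p1 i < 0 then (-1 : Int) else 1)

def pvIM (p0 p1 : List Int) : Nat :=
  (PySem.List.index? (pvDA p0 p1) ((PySem.List.max? (pvDA p0 p1) (fun x => x)).getD 0)).getD 0

def pvM (p0 p1 : List Int) : Int := PySem.List.pyGetD (pvDA p0 p1) ((pvIM p0 p1 : Nat) : Int) 0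

def pvMB (p0 p1 : List Int) : Int := (PySem.List.max? (pvDA p0 p1) (fun x => x)).getD 0

lemma portA_eq (p0 p1 : List Int) :
    BresenhamFunction p0 p1 =
      ((PySem.List.pyRange 0 (pvM p0 p1 + 1) 1).foldl
        (bresOuter (pvIM p0 p1) (pvM p0 p1) (pvDA p0 p1) (pvSG p0 p1) p0.length)
        ((List.replicate p0.length (PySem.Int.floordiv (pvM p0 p1) 2), p0), [])).2 := by
  unfold BresenhamFunction pvM pvIM pvDA pvSG pvF pvL
  simp only [List.map_map]
  rfl

lemma portB_eq (p0 p1 : List Int) :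
    BresenhamFunction_alt p0 p1 =
      (if pvMB p0 p1 = 0 then [p0] else
        (PySem.List.pyRange 0 (pvMB p0 p1 + 1) 1).map (fun t =>
          (PySem.List.pyRange 0 (p0.length : Int) 1).map (fun i =>
            PySem.List.pyGetD p0 i 0 + PySem.List.pyGetD (pvSG p0 p1) i 0 *
              (-(PySem.Int.floordiv
                  (PySem.Int.floordiv (pvMB p0 p1) 2 - PySem.List.pyGetD (pvDA p0 p1) i 0 * t)
                  (pvMB p0 p1)))))) := by
  unfold BresenhamFunction_alt pvMB pvDA pvSG pvF pvL
  simp only [List.map_map]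
  rfl

lemma pv_main (p0 p1 : List Int) (hne : p0 ≠ []) :
    BresenhamFunction p0 p1 = BresenhamFunction_alt p0 p1 := by
  have hn : 0 < p0.length := List.length_pos_of_ne_nil hne
  have hdalen : (pvDA p0 p1).length = p0.length := by
    simp [pvDA, pvL, PySem.List.length_pyRange_one]
  have hdane : pvDA p0 p1 ≠ [] := by
    intro h; rw [h] at hdalen; simp at hdalen; omega
  obtain ⟨mm, hmm⟩ : ∃ mm, PySem.List.max? (pvDA p0 p1) (fun x => x) = some mm := by
    cases h : PySem.List.max? (pvDA p0 p1) (fun x => x) with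
    | none => exact absurd ((PySem.List.max?_eq_none_iff _ _).1 h) hdane
    | some m => exact ⟨m, rfl⟩
  have hmemm : mm ∈ pvDA p0 p1 := PySem.List.max?_mem hmm
  obtain ⟨k, hk⟩ : ∃ k, PySem.List.index? (pvDA p0 p1) mm = some k := by
    cases h : PySem.List.index? (pvDA p0 p1) mm with
    | none =>
      have := (PySem.List.index?_isSome_iff (pvDA p0 p1) mm).2 hmemm
      rw [h] at this; simp at this
    | some k => exact ⟨k, rfl⟩
  obtain ⟨hklt, hdak, -⟩ := PySem.List.getElem_of_index?_eq_some hk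
  have hMB : pvMB p0 p1 = mm := by simp [pvMB, hmm]
  have hIM : pvIM p0 p1 = k := by
    rw [pvIM, hmm, Option.getD_some, hk, Option.getD_some]
  have hM : pvM p0 p1 = mm := by
    rw [pvM, hIM, PySem.List.pyGetD_natCast, List.getD_eq_getElem _ _ hklt, hdak]
  have hget : ∀ j : Int, 0 ≤ j → j < (p0.length : Int) →
      PySem.List.pyGetD (pvDA p0 p1) j 0 = |pvF p0 p1 j| := by
    intro j h0 h1; exact pvL_get _ h0 h1
  have hmm0 : 0 ≤ mm := by
    have : (pvDA p0 p1)[k] = |pvF p0 p1 (0 + (k : Int))| := by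
      simp [pvDA, pvL, PySem.List.getElem_pyRange_one]
    rw [hdak] at this
    rw [this]; positivity
  have hd : ∀ j : Int, 0 ≤ j → j < (p0.length : Int) →
      0 ≤ PySem.List.pyGetD (pvDA p0 p1) j 0 ∧ PySem.List.pyGetD (pvDA p0 p1) j 0 ≤ mm := by
    intro j h0 h1
    rw [hget j h0 h1]
    refine ⟨abs_nonneg _, ?_⟩
    have hmem : |pvF p0 p1 j| ∈ pvDA p0 p1 :=
      List.mem_map_of_mem (PySem.List.mem_pyRange_one.2 ⟨h0, h1⟩)
    exact PySem.List.max?_isMax hmm _ hmem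
  rw [portA_eq, portB_eq, hM, hMB]
  by_cases hz : mm = 0
  · subst hz
    rw [if_pos rfl, PySem.List.pyRange_one_singleton 0]
    simp [bresOuter]
  · have hmpos : 0 < mm := lt_of_le_of_ne hmm0 (Ne.symm hz)
    rw [if_neg hz]
    -- rewrite the initial state into closed-form view
    have hh0 : 0 ≤ mm / 2 := Int.ediv_nonneg (le_of_lt hmpos) (by norm_num)
    have hhlt : mm / 2 < mm := by omega
    have herr : List.replicate p0.length (PySem.Int.floordiv mm 2)
        = pvL p0.length (fun j => pvEE (pvDA p0 p1) (mm / 2) mm j 0) := by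
      rw [PySem.Int.floordiv_eq_ediv_of_pos (by norm_num)]
      have : pvL p0.length (fun j => pvEE (pvDA p0 p1) (mm / 2) mm j 0)
          = pvL p0.length (fun _ => mm / 2) := by
        apply pvL_congr
        intro j h0 h1
        unfold pvEE
        rw [mul_zero, sub_zero, Int.emod_eq_of_lt hh0 hhlt]
      rw [this]
      simp [pvL, List.map_const', PySem.List.length_pyRange_one]
    have hp0 : p0 = pvL p0.length (fun j => pvPP p0 (pvSG p0 p1) (pvDA p0 p1) (mm / 2) mm j 0) := by
      have : pvL p0.length (fun j => pvPP p0 (pvSG p0 p1) (pvDA p0 p1) (mm / 2) mm j 0)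
          = pvL p0.length (fun j => PySem.List.pyGetD p0 j 0) := by
        apply pvL_congr
        intro j h0 h1
        unfold pvPP
        rw [mul_zero, sub_zero, Int.ediv_eq_zero_of_lt hh0 hhlt]
        ring
      rw [this]
      exact (PySem.List.map_pyGetD_pyRange_zero p0 0).symm
    have hinit : ((List.replicate p0.length (PySem.Int.floordiv mm 2), p0),
        ([] : List (List Int)))
        = ((pvL p0.length (fun j => pvEE (pvDA p0 p1) (mm / 2) mm j 0),
            pvL p0.length (fun j => pvPP p0 (pvSG p0 p1) (pvDA p0 p1) (mm / 2) mm j 0)),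
           ([] : List (List Int))) :=
      congrArg₂ Prod.mk (congrArg₂ Prod.mk herr hp0) rfl
    rw [hinit]
    have hdimax : ∀ j : Int, 0 ≤ j → j < (p0.length : Int) → j = ((pvIM p0 p1 : Nat) : Int) →
        PySem.List.pyGetD (pvDA p0 p1) j 0 = mm := by
      intro j _ _ hj
      rw [hj, hIM, PySem.List.pyGetD_natCast, List.getD_eq_getElem _ _ hklt, hdak]
    have hT : (((mm + 1).toNat : Nat) : Int) = mm + 1 := by omega
    rw [← hT,
      outer_fold (pvIM p0 p1) mm (pvDA p0 p1) (pvSG p0 p1) p0 p0.length (mm / 2) hmpos hd hdimax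
        (mm + 1).toNat]
    simp only
    rw [hT]
    apply List.map_congr_left
    intro t _
    apply pvL_congr
    intro i h0 h1
    unfold pvPP
    rw [PySem.Int.floordiv_eq_ediv_of_pos hmpos, PySem.Int.floordiv_eq_ediv_of_pos (by norm_num : (0:Int) < 2)]

-- ===== VERDICT (by name: the statement is the Claim_ definition above) =====
theorem BresenhamFunction_spec : Claim_equal_BresenhamFunction := by
  intro p0 p1 _ hpre
  exact pv_main p0 p1 hpre.1
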